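-- pv_equiv track=rewrite | github.com/hugehoo/problem-solving | 2023/2023-04/ea-2.py | solution
-- ===== SOURCE A (Python) =====
-- from collections import defaultdict
-- from functools import reduce
--
-- def solution(folders, files, selected, excepted):
--     # 1 folders 간 관계를 파악해야돼.
--     # 하위에 존재하는 걸 set 로  묶자
--     # folder_dict
--     fd = defaultdict(set)
--     for child, parent, in folders:
--         fd[parent].add(child)
--
--     # 2 selected 순회하며 탐색할 폴더를 정해서 또 set 에 담는다.
--     selected_folder = set()
--     for s in selected:
--         selected_folder.add(s)
--         if fd.get(s):
--             for element in fd[s]: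
--                 selected_folder.add(element)
--         else:
--             selected_folder.add(s)
--
--     total_size = []
--     count = 0
--     for name, size, folder, in files:
--         if name not in excepted and folder in selected_folder:
--             total_size.append(size)
--             count += 1
--     total_bytes = reduce(lambda x, y: x + y, map(convert_to_bytes, total_size))
--
--     return [total_bytes, count]
--
-- def convert_to_bytes(item):
--     if 'KB' in item:
--         return int(item.replace('KB', '')) * 1024
--     elif 'B' in item:
--         return int(item.replace('B', ''))
-- ===== SOURCE B (Python) =====
-- from functools import reduce
--
-- def convert_to_bytes(item):
--     if 'KB' in item:
--         return int(item.replace('KB', '')) * 1024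
--     elif 'B' in item:
--         return int(item.replace('B', ''))
--
-- def solution(folders, files, selected, excepted):
--     # staged comprehension pipeline: expand the selection by one set comprehension
--     # over folders, filter files with one list comprehension, count = len(sizes)
--     sel = set(selected)
--     chosen = sel | {child for child, parent in folders if parent in sel}
--     exc = set(excepted)
--     sizes = [size for name, size, folder in files if name not in exc and folder in chosen]
--     total_bytes = reduce(lambda x, y: x + y, map(convert_to_bytes, sizes))
--     return [total_bytes, len(sizes)]
-- ===== Notes on version B (the rewrite author's own statement) =====
-- stated objective: simpler
-- what changed: B replaces A's parent-to-children dict plus the per-selected expansion loop and the counting accumulator loop by a staged comprehension pipeline: one set comprehension expands the selection over the folder pairs, one list comprehension filters file sizes, and the count is len(sizes).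
import Mathlib
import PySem

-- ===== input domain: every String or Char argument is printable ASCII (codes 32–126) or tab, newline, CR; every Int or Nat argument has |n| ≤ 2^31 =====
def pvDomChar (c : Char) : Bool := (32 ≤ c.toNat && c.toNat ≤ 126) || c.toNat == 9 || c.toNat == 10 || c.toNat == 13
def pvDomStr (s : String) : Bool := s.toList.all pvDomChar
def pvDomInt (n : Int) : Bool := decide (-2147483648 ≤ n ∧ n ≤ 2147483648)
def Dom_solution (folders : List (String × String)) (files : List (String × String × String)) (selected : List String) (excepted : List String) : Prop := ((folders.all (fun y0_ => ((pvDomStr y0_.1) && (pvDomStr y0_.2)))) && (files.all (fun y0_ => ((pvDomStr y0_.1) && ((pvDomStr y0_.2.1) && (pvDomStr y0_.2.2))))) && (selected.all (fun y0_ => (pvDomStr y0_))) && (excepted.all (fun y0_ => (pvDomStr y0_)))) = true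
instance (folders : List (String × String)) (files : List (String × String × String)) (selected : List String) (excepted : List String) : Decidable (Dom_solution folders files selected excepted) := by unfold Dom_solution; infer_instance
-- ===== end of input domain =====

-- B replaces A's parent→children dict, expansion loop and counting loop by a staged
-- comprehension pipeline (expand selection, filter sizes, count = len); equal on Pre_.

-- shared module helper convert_to_bytes: outer 'some v' = returns (v : Option Int, None when no 'B'),
-- 'none' = int() raised ValueError
def convB (s : String) : Option (Option Int) :=
  if PySem.Str.isIn "KB" s then
    (PySem.Int.ofStr? (PySem.Str.replace s "KB" "")).map (fun n => some (n * 1024))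
  else if PySem.Str.isIn "B" s then
    (PySem.Int.ofStr? (PySem.Str.replace s "B" "")).map some
  else some none

-- reduce(lambda x, y: x + y, map(convert_to_bytes, sizes)); inner 'none' (= a raise) is only
-- reached outside Pre_solution, where A raises TypeError/ValueError
def redStep (x y : Option (Option Int)) : Option (Option Int) :=
  match x, y with
  | some (some a), some (some b) => some (some (a + b))
  | _, _ => none

def reduceConv (sizes : List String) : Option Int :=
  match sizes.map convB with
  | [] => none
  | h :: t => Option.join (t.foldl redStep h)

-- ===== PORT A =====
def solution (folders : List (String × String)) (files : List (String × String × String)) (selected : List String) (excepted : List String) : List (Option Int) :=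
  let fd := folders.foldl
    (fun d cp => d.insert cp.2 (PySem.Set.add (d.getD cp.2 PySem.Set.empty) cp.1))
    PySem.Dict.empty
  let selectedFolder := selected.foldl
    (fun sf s =>
      let sf := PySem.Set.add sf s
      match fd.get? s with
      | some t => if t.isEmpty then PySem.Set.add sf s else t.foldl PySem.Set.add sf
      | none => PySem.Set.add sf s)
    PySem.Set.empty
  let st := files.foldl
    (fun (acc : List String × Int) f =>
      if !excepted.contains f.1 && PySem.Set.contains selectedFolder f.2.2 then
        (acc.1 ++ [f.2.1], acc.2 + 1)
      else acc)
    ([], 0)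
  [reduceConv st.1, some st.2]

-- ===== PORT B =====
def solution_alt (folders : List (String × String)) (files : List (String × String × String)) (selected : List String) (excepted : List String) : List (Option Int) :=
  let sel := PySem.Set.ofList selected
  -- sel | {child for child, parent in folders if parent in sel}
  let chosen := folders.foldl
    (fun s cp => if PySem.Set.contains sel cp.2 then PySem.Set.add s cp.1 else s) sel
  let exc := PySem.Set.ofList excepted
  let sizes := (files.filter
      (fun f => !PySem.Set.contains exc f.1 && PySem.Set.contains chosen f.2.2)).map
    (fun f => f.2.1)
  [reduceConv sizes, some (sizes.length : Int)]

-- ===== PRECONDITION & SPEC =====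
-- a file qualifies: its name is not excepted and its folder is selected or a direct child of a selected folder
def pvQual (folders : List (String × String)) (selected : List String) (excepted : List String) (f : String × String × String) : Bool :=
  !excepted.contains f.1 &&
    (selected.contains f.2.2 || folders.any (fun cp => cp.1 == f.2.2 && selected.contains cp.2))

-- Pre_ excludes exactly the inputs where A raises: no qualifying file (reduce of an empty
-- sequence, TypeError), a qualifying size int() cannot parse (ValueError), or — with at least
-- two qualifying files — a size without 'B' (convert_to_bytes returns None, so '+' raises TypeError).
def Pre_solution (folders : List (String × String)) (files : List (String × String × String)) (selected : List String) (excepted : List String) : Prop :=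
  let sizes := (files.filter (pvQual folders selected excepted)).map (fun f => f.2.1)
  sizes ≠ [] ∧ (∀ s ∈ sizes, convB s ≠ none) ∧
    (sizes.length = 1 ∨ ∀ s ∈ sizes, convB s ≠ some none)
instance (folders : List (String × String)) (files : List (String × String × String)) (selected : List String) (excepted : List String) : Decidable (Pre_solution folders files selected excepted) := by unfold Pre_solution; infer_instance

def pvWitness_solution : (List (String × String)) × (List (String × String × String)) × List String × List String :=
  ([("a", "b")], [("f", "10B", "a"), ("g", "2KB", "b")], ["b"], ["g"])

def Spec_solution (folders : List (String × String)) (files : List (String × String × String)) (selected : List String) (excepted : List String) (out : List (Option Int)) : Prop := out = solution_alt folders files selected excepted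
instance (folders : List (String × String)) (files : List (String × String × String)) (selected : List String) (excepted : List String) (out : List (Option Int)) : Decidable (Spec_solution folders files selected excepted out) := by unfold Spec_solution; infer_instance

-- ===== CLAIM (what is proved, stated in full; the proofs are below) =====
def Claim_equal_solution : Prop := ∀ (folders : List (String × String)) (files : List (String × String × String)) (selected : List String) (excepted : List String), Dom_solution folders files selected excepted → Pre_solution folders files selected excepted → Spec_solution folders files selected excepted (solution folders files selected excepted)

-- ===== LEMMAS AND PROOFS =====

-- membership in the value sets of a grouping dict built by d[k(a)].add(v(a))
theorem mem_getD_build {α : Type} (k v : α → String) (l : List α) :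
    ∀ (d : PySem.Dict String (PySem.Set String)) (p x : String),
      x ∈ (l.foldl (fun d a => d.insert (k a) (PySem.Set.add (d.getD (k a) PySem.Set.empty) (v a))) d).getD p PySem.Set.empty
        ↔ x ∈ d.getD p PySem.Set.empty ∨ ∃ a ∈ l, k a = p ∧ v a = x := by
  induction l with
  | nil => simp
  | cons hd tl ih =>
    intro d p x
    rw [List.foldl_cons, ih, PySem.Dict.getD_insert]
    by_cases h : p = k hd
    · rw [if_pos h]; subst h
      simp only [PySem.Set.mem_add, List.mem_cons]
      constructor
      · rintro ((h | h) | ⟨a, ha, h1, h2⟩)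
        exacts [Or.inl h, Or.inr ⟨hd, Or.inl rfl, rfl, h.symm⟩, Or.inr ⟨a, Or.inr ha, h1, h2⟩]
      · rintro (h | ⟨a, rfl | ha, h1, h2⟩)
        exacts [Or.inl (Or.inl h), Or.inl (Or.inr h2.symm), Or.inr ⟨a, ha, h1, h2⟩]
    · rw [if_neg h]
      simp only [List.mem_cons]
      constructor
      · rintro (h' | ⟨a, ha, h1, h2⟩)
        exacts [Or.inl h', Or.inr ⟨a, Or.inr ha, h1, h2⟩]
      · rintro (h' | ⟨a, rfl | ha, h1, h2⟩)
        exacts [Or.inl h', absurd h1.symm h, Or.inr ⟨a, ha, h1, h2⟩]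

theorem mem_foldl_set_add (t : List String) :
    ∀ (s : PySem.Set String) (x : String),
      x ∈ t.foldl PySem.Set.add s ↔ x ∈ s ∨ x ∈ t := by
  induction t with
  | nil => simp
  | cons hd tl ih =>
    intro s x
    simp [ih, PySem.Set.mem_add]
    tauto

-- membership in A's expanded selected_folder set
theorem mem_selected_folder (fd : PySem.Dict String (PySem.Set String)) (selected : List String) :
    ∀ (init : PySem.Set String) (x : String),
      x ∈ selected.foldl
        (fun sf s =>
          let sf := PySem.Set.add sf s
          match fd.get? s with
          | some t => if t.isEmpty then PySem.Set.add sf s else t.foldl PySem.Set.add sf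
          | none => PySem.Set.add sf s)
        init
        ↔ x ∈ init ∨ ∃ s ∈ selected, x = s ∨ x ∈ fd.getD s PySem.Set.empty := by
  induction selected with
  | nil => simp
  | cons hd tl ih =>
    intro init x
    simp only [List.foldl_cons, ih, List.mem_cons]
    have hstep : (x ∈ (match fd.get? hd with
        | some t => if t.isEmpty then PySem.Set.add (PySem.Set.add init hd) hd
                    else t.foldl PySem.Set.add (PySem.Set.add init hd)
        | none => PySem.Set.add (PySem.Set.add init hd) hd))
        ↔ x ∈ init ∨ x = hd ∨ x ∈ fd.getD hd PySem.Set.empty := by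
      rcases hget : fd.get? hd with _ | t
      · simp [PySem.Set.mem_add, PySem.Dict.getD_eq_get?_getD, hget]
      · simp only [PySem.Dict.getD_eq_get?_getD, hget, Option.getD_some]
        by_cases he : t.isEmpty
        · have : t = [] := by simpa [List.isEmpty_iff] using he
          subst this
          simp [he, PySem.Set.mem_add]
        · simp [he, mem_foldl_set_add, PySem.Set.mem_add]
          tauto
    rw [hstep]
    constructor
    · rintro ((h | h) | ⟨s, hs, h⟩)
      · exact Or.inl h
      · exact Or.inr ⟨hd, Or.inl rfl, h⟩
      · exact Or.inr ⟨s, Or.inr hs, h⟩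
    · rintro (h | ⟨s, (rfl | hs), h⟩)
      · exact Or.inl (Or.inl h)
      · exact Or.inl (Or.inr h)
      · exact Or.inr ⟨s, hs, h⟩

-- A's grouping dict, specialised
theorem mem_getD_buildA (folders : List (String × String)) (p x : String) :
    x ∈ (folders.foldl (fun d cp => d.insert cp.2 (PySem.Set.add (d.getD cp.2 PySem.Set.empty) cp.1)) PySem.Dict.empty).getD p PySem.Set.empty
      ↔ ∃ a ∈ folders, a.2 = p ∧ a.1 = x := by
  have := mem_getD_build (fun cp : String × String => cp.2) (fun cp => cp.1) folders PySem.Dict.empty p x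
  simpa [PySem.Dict.getD_empty, PySem.Set.empty] using this

-- membership in B's one-pass expanded selection set (stated in the simp-normal form)
theorem mem_chosen (selected : List String) (folders : List (String × String)) :
    ∀ (init : PySem.Set String) (x : String),
      x ∈ folders.foldl (fun s cp => if cp.2 ∈ selected then PySem.Set.add s cp.1 else s) init
        ↔ x ∈ init ∨ ∃ cp ∈ folders, cp.2 ∈ selected ∧ cp.1 = x := by
  induction folders with
  | nil => simp
  | cons hd tl ih =>
    intro init x
    simp only [List.foldl_cons, ih, List.mem_cons]
    by_cases h : hd.2 ∈ selected
    · rw [if_pos h]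
      simp only [PySem.Set.mem_add]
      constructor
      · rintro ((h' | h') | ⟨cp, hcp, h1, h2⟩)
        exacts [Or.inl h', Or.inr ⟨hd, Or.inl rfl, h, h'.symm⟩, Or.inr ⟨cp, Or.inr hcp, h1, h2⟩]
      · rintro (h' | ⟨cp, rfl | hcp, h1, h2⟩)
        exacts [Or.inl (Or.inl h'), Or.inl (Or.inr h2.symm), Or.inr ⟨cp, hcp, h1, h2⟩]
    · rw [if_neg h]
      constructor
      · rintro (h' | ⟨cp, hcp, h1, h2⟩)
        exacts [Or.inl h', Or.inr ⟨cp, Or.inr hcp, h1, h2⟩]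
      · rintro (h' | ⟨cp, rfl | hcp, h1, h2⟩)
        exacts [Or.inl h', absurd h1 h, Or.inr ⟨cp, hcp, h1, h2⟩]

-- A's counting fold is B's filter+map pipeline with the count as the length
theorem foldl_eq_filter_map {α : Type} (p : α → Bool) (g : α → String) (l : List α) :
    ∀ (acc1 : List String) (acc2 : Int),
      l.foldl (fun (acc : List String × Int) f => if p f then (acc.1 ++ [g f], acc.2 + 1) else acc) (acc1, acc2)
        = (acc1 ++ (l.filter p).map g, acc2 + ((l.filter p).length : Int)) := by
  induction l with
  | nil => simp
  | cons hd tl ih =>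
    intro acc1 acc2
    by_cases h : p hd
    · simp only [List.foldl_cons, h, if_pos, List.filter_cons_of_pos h, List.map_cons, ih]
      simp [List.append_assoc]
      ring
    · simp [List.foldl_cons, h, List.filter_cons_of_neg, ih]

-- the two per-file tests compute the same Bool
theorem cond_eq (folders : List (String × String)) (selected : List String) (excepted : List String) (f : String × String × String) :
    (!excepted.contains f.1 && PySem.Set.contains
        (selected.foldl
          (fun sf s =>
            let sf := PySem.Set.add sf s
            match (folders.foldl (fun d cp => d.insert cp.2 (PySem.Set.add (d.getD cp.2 PySem.Set.empty) cp.1)) PySem.Dict.empty).get? s with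
            | some t => if t.isEmpty then PySem.Set.add sf s else t.foldl PySem.Set.add sf
            | none => PySem.Set.add sf s)
          PySem.Set.empty) f.2.2)
    = (!PySem.Set.contains (PySem.Set.ofList excepted) f.1 &&
        PySem.Set.contains
          (folders.foldl (fun s cp => if PySem.Set.contains (PySem.Set.ofList selected) cp.2 then PySem.Set.add s cp.1 else s)
            (PySem.Set.ofList selected)) f.2.2) := by
  rw [Bool.eq_iff_iff]
  simp only [PySem.Set.contains, List.contains_eq_mem, Bool.and_eq_true, Bool.not_eq_true',
    decide_eq_true_eq, decide_eq_false_iff_not, PySem.Set.mem_ofList,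
    mem_selected_folder, mem_chosen, mem_getD_buildA]
  simp only [PySem.Set.empty, List.not_mem_nil, false_or]
  constructor
  · rintro ⟨hne, s, hs, rfl | ⟨a, ha, h1, h2⟩⟩
    · exact ⟨hne, Or.inl hs⟩
    · exact ⟨hne, Or.inr ⟨a, ha, h1 ▸ hs, h2⟩⟩
  · rintro ⟨hne, h | ⟨cp, hcp, h1, h2⟩⟩
    · exact ⟨hne, f.2.2, h, Or.inl rfl⟩
    · exact ⟨hne, cp.2, h1, Or.inr ⟨cp, hcp, rfl, h2⟩⟩

-- ===== VERDICT (by name: the statement is the Claim_ definition above) =====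
theorem solution_spec : Claim_equal_solution := by
  intro folders files selected excepted _ _
  unfold Spec_solution solution solution_alt
  have h1 : (files.foldl
      (fun (acc : List String × Int) f =>
        if !excepted.contains f.1 && PySem.Set.contains
            (selected.foldl
              (fun sf s =>
                let sf := PySem.Set.add sf s
                match (folders.foldl (fun d cp => d.insert cp.2 (PySem.Set.add (d.getD cp.2 PySem.Set.empty) cp.1)) PySem.Dict.empty).get? s with
                | some t => if t.isEmpty then PySem.Set.add sf s else t.foldl PySem.Set.add sf
                | none => PySem.Set.add sf s)
              PySem.Set.empty) f.2.2 then
          (acc.1 ++ [f.2.1], acc.2 + 1)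
        else acc)
      (([] : List String), (0 : Int)))
    = files.foldl
      (fun (acc : List String × Int) f =>
        if !PySem.Set.contains (PySem.Set.ofList excepted) f.1 &&
           PySem.Set.contains
             (folders.foldl (fun s cp => if PySem.Set.contains (PySem.Set.ofList selected) cp.2 then PySem.Set.add s cp.1 else s)
               (PySem.Set.ofList selected)) f.2.2 then
          (acc.1 ++ [f.2.1], acc.2 + 1)
        else acc)
      (([] : List String), (0 : Int)) := by
    apply PySem.List.foldl_congr_mem
    intro acc f _
    rw [cond_eq folders selected excepted f]
  simp only [h1, foldl_eq_filter_map]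
  simp
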